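-- pv_equiv track=rewrite | github.com/umamahc/advent-of-code | 2022/day3/day3.py | get_item_priority
-- ===== SOURCE A (Python) =====
-- def get_item_priority(char: str) -> int:
--     alphabet = 'abcdefghijklmnopqrstuvwxyz'
--     alphabet_upper = alphabet.upper()
--     lower_priority = list(enumerate(alphabet, start=1))
--     upper_priority = list(enumerate(alphabet_upper, start=27))
--     for priority, letter in lower_priority:
--         if letter == char:
--             return priority
--     for priority, letter in upper_priority:
--         if letter == char:
--             return priority
-- ===== SOURCE B (Python) =====
-- def get_item_priority(char: str) -> int:
--     if len(char) == 1:
--         if 'a' <= char <= 'z':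
--             return ord(char) - ord('a') + 1
--         if 'A' <= char <= 'Z':
--             return ord(char) - ord('A') + 27
--     return None
-- ===== Notes on version B (the rewrite author's own statement) =====
-- stated objective: simpler
-- what changed: Replaces the two 26-entry scanning loops over enumerated alphabet lists with a closed-form arithmetic mapping from the character code, guarded by a length-1 check so non-letter, empty and multi-character strings still yield None.
import Mathlib
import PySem

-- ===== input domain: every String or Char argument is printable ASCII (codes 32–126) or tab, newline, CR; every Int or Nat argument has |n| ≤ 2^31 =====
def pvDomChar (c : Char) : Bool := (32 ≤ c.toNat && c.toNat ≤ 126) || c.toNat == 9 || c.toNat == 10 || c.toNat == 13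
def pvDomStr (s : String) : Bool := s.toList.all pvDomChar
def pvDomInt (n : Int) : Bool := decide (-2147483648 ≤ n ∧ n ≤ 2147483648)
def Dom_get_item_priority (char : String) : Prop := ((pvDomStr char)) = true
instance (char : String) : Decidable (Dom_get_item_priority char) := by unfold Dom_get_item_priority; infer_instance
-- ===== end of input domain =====

-- B replaces A's two 26-entry enumerate-and-scan loops by a closed-form arithmetic
-- mapping from the character code, guarded by a length-1 check (objective: simpler).


-- ===== PORT A =====
-- helper: one Python 'for priority, letter in …: if letter == char: return priority' loop
def gipScan (ps : List (Int × Char)) (char : String) : Option Int :=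
  match ps with
  | [] => none
  | (p, l) :: rest => if char.toList = [l] then some p else gipScan rest char

def get_item_priority (char : String) : Option Int :=
  let alphabet := "abcdefghijklmnopqrstuvwxyz"
  let alphabet_upper := PySem.Str.upper alphabet
  let lower_priority := PySem.List.enumerate alphabet.toList 1
  let upper_priority := PySem.List.enumerate alphabet_upper.toList 27
  match gipScan lower_priority char with
  | some p => some p
  | none => gipScan upper_priority char

-- ===== PORT B =====
def get_item_priority_alt (char : String) : Option Int :=
  match char.toList with
  | [c] =>
    if 97 ≤ c.toNat ∧ c.toNat ≤ 122 then some ((c.toNat : Int) - 97 + 1)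
    else if 65 ≤ c.toNat ∧ c.toNat ≤ 90 then some ((c.toNat : Int) - 65 + 27)
    else none
  | _ => none

-- ===== PRECONDITION & SPEC =====
def Spec_get_item_priority (char : String) (out : Option Int) : Prop := out = get_item_priority_alt char
instance (char : String) (out : Option Int) : Decidable (Spec_get_item_priority char out) := by unfold Spec_get_item_priority; infer_instance

-- ===== CLAIM (what is proved, stated in full; the proofs are below) =====
def Claim_equal_get_item_priority : Prop := ∀ (char : String), Dom_get_item_priority char → Spec_get_item_priority char (get_item_priority char)

-- ===== LEMMAS AND PROOFS =====
lemma gipScan_none (ps : List (Int × Char)) (char : String)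
    (h : char.toList.length ≠ 1) : gipScan ps char = none := by
  induction ps with
  | nil => rfl
  | cons p rest ih =>
    obtain ⟨pr, l⟩ := p
    rw [gipScan, if_neg, ih]
    intro he
    exact h (by rw [he]; rfl)

set_option maxRecDepth 4096 in
lemma gip_key : ∀ n ∈ List.range 127,
    get_item_priority (String.ofList [Char.ofNat n]) = get_item_priority_alt (String.ofList [Char.ofNat n]) := by
  decide

-- ===== VERDICT (by name: the statement is the Claim_ definition above) =====
theorem get_item_priority_spec : Claim_equal_get_item_priority := by
  intro char hdom
  unfold Spec_get_item_priority
  cases hc : char.toList with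
  | nil =>
    rw [get_item_priority, get_item_priority_alt]
    simp [gipScan_none _ _ (by rw [hc]; simp), hc]
  | cons c rest =>
    cases rest with
    | cons d rest2 =>
      rw [get_item_priority, get_item_priority_alt]
      simp [gipScan_none _ _ (by rw [hc]; simp), hc]
    | nil =>
      have hchar : char = String.ofList [c] := by
        rw [← hc, String.ofList_toList]
      have hdomc : pvDomChar c = true := by
        unfold Dom_get_item_priority pvDomStr at hdom
        rw [hc] at hdom
        simpa using hdom
      have hlt : c.toNat < 127 := by
        unfold pvDomChar at hdomc
        simp at hdomc
        omega
      have := gip_key c.toNat (List.mem_range.mpr hlt)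
      rwa [Char.ofNat_toNat, ← hchar] at this
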